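-- pv_equiv track=rewrite | github.com/dannystaple/python_subleq | assembler.py | calculate_labels
-- ===== SOURCE A (Python) =====
-- def calculate_labels(first_pass):
--     """Given the first pass code, generate any labels"""
--     address = 0
--     labels = {}
--     for label, instruction in first_pass:
--         if label:
--             labels[label] = address
--         address += len(instruction)
--     return labels
-- ===== SOURCE B (Python) =====
-- def calculate_labels(first_pass):
--     """Given the first pass code, generate any labels"""
--     pairs = list(first_pass)
--     lengths = [len(instruction) for _, instruction in pairs]
--     offsets = []
--     total = 0
--     for n in lengths:
--         offsets.append(total)
--         total += n
--     return {label: off for (label, _), off in zip(pairs, offsets) if label}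
-- ===== Notes on version B (the rewrite author's own statement) =====
-- stated objective: alternative
-- what changed: B separates the work into passes: a lengths list, an exclusive prefix-sum of offsets, then one filtering dict comprehension over the zipped pairs, instead of A's single loop carrying a running address and mutating a dict.
import Mathlib
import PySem

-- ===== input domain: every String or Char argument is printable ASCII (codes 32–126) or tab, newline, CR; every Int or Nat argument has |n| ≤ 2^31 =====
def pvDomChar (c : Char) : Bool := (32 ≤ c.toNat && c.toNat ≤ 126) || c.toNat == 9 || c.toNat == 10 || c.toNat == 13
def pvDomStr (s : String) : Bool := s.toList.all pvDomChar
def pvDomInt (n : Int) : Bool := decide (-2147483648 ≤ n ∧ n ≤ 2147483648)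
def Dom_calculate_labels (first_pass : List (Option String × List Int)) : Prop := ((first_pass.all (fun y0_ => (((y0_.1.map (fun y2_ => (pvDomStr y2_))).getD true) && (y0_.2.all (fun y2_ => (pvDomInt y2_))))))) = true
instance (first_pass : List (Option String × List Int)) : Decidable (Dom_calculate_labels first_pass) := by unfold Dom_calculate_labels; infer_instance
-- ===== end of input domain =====

-- B computes addresses as an exclusive prefix-sum pass, then filters once; same return value as A.

-- ===== PORT A =====
-- one loop carrying (address, labels): conditional insert, then address += len(instruction)
def calculate_labels (first_pass : List (Option String × List Int)) : List (String × Int) :=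
  (first_pass.foldl
    (fun (st : Int × PySem.Dict String Int) p =>
      let labels := match p.1 with
        | some l => if l ≠ "" then st.2.insert l st.1 else st.2
        | none => st.2
      (st.1 + (p.2.length : Int), labels))
    (0, PySem.Dict.empty)).2.items

-- ===== PORT B =====
-- exclusive prefix sum of the lengths (the loop appending `total` then adding n)
def pvExScan (t : Int) : List Int → List Int
  | [] => []
  | n :: ns => t :: pvExScan (t + n) ns

def calculate_labels_alt (first_pass : List (Option String × List Int)) : List (String × Int) :=
  let lengths := first_pass.map (fun p => (p.2.length : Int))
  let offsets := pvExScan 0 lengths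
  ((first_pass.zip offsets).foldl
    (fun (d : PySem.Dict String Int) x =>
      match x.1.1 with
      | some l => if l ≠ "" then d.insert l x.2 else d
      | none => d)
    PySem.Dict.empty).items

-- ===== PRECONDITION & SPEC =====
def Spec_calculate_labels (first_pass : List (Option String × List Int)) (out : List (String × Int)) : Prop := out = calculate_labels_alt first_pass
instance (first_pass : List (Option String × List Int)) (out : List (String × Int)) : Decidable (Spec_calculate_labels first_pass out) := by unfold Spec_calculate_labels; infer_instance

-- ===== CLAIM (what is proved, stated in full; the proofs are below) =====
def Claim_equal_calculate_labels : Prop := ∀ (first_pass : List (Option String × List Int)), Dom_calculate_labels first_pass → Spec_calculate_labels first_pass (calculate_labels first_pass)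

-- ===== LEMMAS AND PROOFS =====

-- A's fold from (addr, d) equals B's fold over the pairs zipped with the prefix sums started at addr
theorem pvFold_agree (fp : List (Option String × List Int)) :
    ∀ (addr : Int) (d : PySem.Dict String Int),
    (fp.foldl
      (fun (st : Int × PySem.Dict String Int) p =>
        let labels := match p.1 with
          | some l => if l ≠ "" then st.2.insert l st.1 else st.2
          | none => st.2
        (st.1 + (p.2.length : Int), labels))
      (addr, d)).2
    = (fp.zip (pvExScan addr (fp.map (fun p => (p.2.length : Int))))).foldl
      (fun (d : PySem.Dict String Int) x =>
        match x.1.1 with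
        | some l => if l ≠ "" then d.insert l x.2 else d
        | none => d) d := by
  induction fp with
  | nil => intro addr d; rfl
  | cons p ps ih =>
    intro addr d
    simp only [List.foldl, List.map, pvExScan, List.zip, List.zipWith]
    exact ih (addr + (p.2.length : Int)) _

-- ===== VERDICT (by name: the statement is the Claim_ definition above) =====
theorem calculate_labels_spec : Claim_equal_calculate_labels := by
  intro fp _
  unfold Spec_calculate_labels calculate_labels calculate_labels_alt
  rw [pvFold_agree fp 0 PySem.Dict.empty]
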